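-- pv_equiv track=rewrite | github.com/Matt-Ung/Hub_Dev | MCPServers/flareFlossMCP.py | _normalize_multivalue_choice_flags
-- ===== SOURCE A (Python) =====
-- from typing import List, Optional
--
-- def _normalize_multivalue_choice_flags(argv: List[str]) -> List[str]:
--     if not argv:
--         return []
--
--     choice_flags = {"--only", "--no"}
--     normalized: List[str] = []
--     idx = 0
--     while idx < len(argv):
--         token = argv[idx]
--         matched_inline = False
--         for flag in choice_flags:
--             prefix = f"{flag}="
--             if token.startswith(prefix):
--                 values = [part.strip() for part in token[len(prefix) :].split(",") if part.strip()]
--                 if len(values) > 1: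
--                     normalized.append(flag)
--                     normalized.extend(values)
--                     matched_inline = True
--                 break
--         if matched_inline:
--             idx += 1
--             continue
--
--         normalized.append(token)
--         if token not in choice_flags:
--             idx += 1
--             continue
--
--         idx += 1
--         while idx < len(argv):
--             candidate = argv[idx]
--             if candidate.startswith("-"):
--                 break
--             parts = [part.strip() for part in candidate.split(",") if part.strip()]
--             normalized.extend(parts or [candidate])
--             idx += 1
--     return normalized
-- ===== SOURCE B (Python) =====
-- from typing import List
--
-- def _normalize_multivalue_choice_flags(argv: List[str]) -> List[str]:
--     choice_flags = ("--only", "--no")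
--     out: List[str] = []
--     collecting = False
--     for token in argv:
--         if collecting and not token.startswith("-"):
--             parts = [p.strip() for p in token.split(",") if p.strip()]
--             out.extend(parts or [token])
--             continue
--         collecting = False
--         inline = False
--         for flag in choice_flags:
--             if token.startswith(flag + "="):
--                 values = [p.strip() for p in token[len(flag) + 1:].split(",") if p.strip()]
--                 if len(values) > 1:
--                     out.append(flag)
--                     out.extend(values)
--                     inline = True
--                 break
--         if inline:
--             continue
--         out.append(token)
--         if token in choice_flags:
--             collecting = True
--     return out
-- ===== Notes on version B (the rewrite author's own statement) =====
-- stated objective: simpler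
-- what changed: Replaced the nested while-loops with manual index advancement by a single flat for-loop over the tokens that carries a boolean 'collecting' state, so each token is examined exactly once and no index bookkeeping is needed.
import Mathlib
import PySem

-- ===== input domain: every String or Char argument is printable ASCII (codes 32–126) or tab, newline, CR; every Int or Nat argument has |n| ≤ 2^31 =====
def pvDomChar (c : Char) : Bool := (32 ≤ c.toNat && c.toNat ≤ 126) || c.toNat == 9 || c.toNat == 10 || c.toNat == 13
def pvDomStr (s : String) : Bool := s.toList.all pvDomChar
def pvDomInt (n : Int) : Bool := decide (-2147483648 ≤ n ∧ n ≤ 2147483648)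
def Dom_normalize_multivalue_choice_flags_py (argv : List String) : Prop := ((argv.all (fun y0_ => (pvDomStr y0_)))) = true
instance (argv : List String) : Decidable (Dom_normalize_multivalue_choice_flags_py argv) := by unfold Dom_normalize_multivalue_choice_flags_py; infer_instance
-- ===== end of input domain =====

-- B rewrites A's nested while-loops (manual index advancement) as one flat pass with a boolean
-- 'collecting' state; return values proved equal on all of Dom.

-- Shared helpers (identical code appears verbatim in both Pythons):
-- [part.strip() for part in s.split(",") if part.strip()]
def pvSplitStrip (s : String) : List String :=
  ((((PySem.Chars.splitOn s.toList [',']).map PySem.Chars.strip).filter (fun p => p != [])).map String.ofList)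

def pvChoiceFlags : List String := ["--only", "--no"]

-- the 'for flag in choice_flags: if token.startswith(flag+"="): …; break' block of both Pythons:
-- some (flag, values) exactly when matched_inline becomes True (values has > 1 entries).
-- token[len(prefix):] is ported as a drop on toList, exact here since token starts with prefix.
def pvInline (token : String) : Option (String × List String) :=
  match pvChoiceFlags.find? (fun flag => PySem.Str.startswith token (flag ++ "=")) with
  | none => none
  | some flag =>
      let values := pvSplitStrip (String.ofList (token.toList.drop (flag ++ "=").toList.length))
      if values.length > 1 then some (flag, values) else none

-- ===== PORT A =====
-- A's inner 'while idx < len(argv): candidate = argv[idx] …' collection loop: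
-- returns (the values appended, the remaining suffix of argv).
def pvCollectA : List String → List String × List String
  | [] => ([], [])
  | c :: rest =>
      if PySem.Str.startswith c "-" then ([], c :: rest)
      else
        let parts := pvSplitStrip c
        let pr := pvCollectA rest
        ((if parts.isEmpty then [c] else parts) ++ pr.1, pr.2)

theorem pvCollectA_len : ∀ xs : List String, (pvCollectA xs).2.length ≤ xs.length := by
  intro xs
  induction xs with
  | nil => simp [pvCollectA]
  | cons c rest ih =>
      simp only [pvCollectA]
      split
      · simp
      · exact le_trans ih (Nat.le_succ _)

def normalize_multivalue_choice_flags_py : List String → List String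
  | [] => []
  | token :: rest =>
      match pvInline token with
      | some (flag, values) => flag :: values ++ normalize_multivalue_choice_flags_py rest
      | none =>
          if token ∈ pvChoiceFlags then
            let pr := pvCollectA rest
            token :: pr.1 ++ normalize_multivalue_choice_flags_py pr.2
          else
            token :: normalize_multivalue_choice_flags_py rest
termination_by argv => argv.length
decreasing_by
  all_goals simp
  all_goals have := pvCollectA_len rest
  all_goals omega

-- ===== PORT B =====
-- the flat loop of Source B: 'collecting' is the boolean state carried across tokens.
def pvGoB (collecting : Bool) : List String → List String
  | [] => []
  | token :: rest =>
      if collecting && !(PySem.Str.startswith token "-") then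
        let parts := pvSplitStrip token
        (if parts.isEmpty then [token] else parts) ++ pvGoB collecting rest
      else
        match pvInline token with
        | some (flag, values) => flag :: values ++ pvGoB false rest
        | none => token :: pvGoB (pvChoiceFlags.contains token) rest

def normalize_multivalue_choice_flags_py_alt (argv : List String) : List String :=
  pvGoB false argv

-- ===== PRECONDITION & SPEC =====
def Spec_normalize_multivalue_choice_flags_py (argv : List String) (out : List String) : Prop := out = normalize_multivalue_choice_flags_py_alt argv
instance (argv : List String) (out : List String) : Decidable (Spec_normalize_multivalue_choice_flags_py argv out) := by unfold Spec_normalize_multivalue_choice_flags_py; infer_instance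

-- ===== CLAIM (what is proved, stated in full; the proofs are below) =====
def Claim_equal_normalize_multivalue_choice_flags_py : Prop := ∀ (argv : List String), Dom_normalize_multivalue_choice_flags_py argv → Spec_normalize_multivalue_choice_flags_py argv (normalize_multivalue_choice_flags_py argv)

-- ===== LEMMAS AND PROOFS =====

-- B's else branch does not depend on the incoming 'collecting' flag, so on a dash token
-- pvGoB true and pvGoB false agree.
theorem pvGoB_dash (t : String) (rest : List String)
    (h : PySem.Chars.startswith t.toList ['-'] = true) :
    pvGoB true (t :: rest) = pvGoB false (t :: rest) := by
  simp [pvGoB, h]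

-- collecting mode of B = A's inner collection loop followed by normal processing
theorem pvGoB_true_eq : ∀ xs : List String,
    pvGoB true xs = (pvCollectA xs).1 ++ pvGoB false (pvCollectA xs).2 := by
  intro xs
  induction xs with
  | nil => simp [pvGoB, pvCollectA]
  | cons c rest ih =>
      by_cases h : PySem.Chars.startswith c.toList ['-'] = true
      · rw [pvGoB_dash c rest h]
        simp [pvCollectA, h]
      · simp only [pvCollectA]
        simp only [pvGoB, PySem.Str.startswith_eq]
        simp [h, ih, List.append_assoc]

theorem pvMain : ∀ (n : Nat) (xs : List String), xs.length ≤ n →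
    normalize_multivalue_choice_flags_py xs = pvGoB false xs := by
  intro n
  induction n with
  | zero =>
      intro xs h
      have hx : xs = [] := List.eq_nil_of_length_eq_zero (Nat.le_zero.mp h)
      subst hx
      rw [normalize_multivalue_choice_flags_py.eq_def]
      simp [pvGoB]
  | succ n ih =>
      intro xs h
      cases xs with
      | nil =>
          rw [normalize_multivalue_choice_flags_py.eq_def]
          simp [pvGoB]
      | cons token rest =>
          simp only [List.length_cons, Nat.succ_le_succ_iff] at h
          rw [normalize_multivalue_choice_flags_py.eq_def]
          simp only [pvGoB, Bool.false_and, Bool.false_eq_true, if_false]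
          cases hinl : pvInline token with
          | some p =>
              cases p with
              | mk flag values => simp [ih rest h]
          | none =>
              by_cases hm : token ∈ pvChoiceFlags
              · have hrem : (pvCollectA rest).2.length ≤ n :=
                  le_trans (pvCollectA_len rest) h
                simp [hm, pvGoB_true_eq rest, ih _ hrem]
              · simp [hm, ih rest h]

-- ===== VERDICT (by name: the statement is the Claim_ definition above) =====
theorem normalize_multivalue_choice_flags_py_spec : Claim_equal_normalize_multivalue_choice_flags_py := by
  intro argv _
  unfold Spec_normalize_multivalue_choice_flags_py normalize_multivalue_choice_flags_py_alt
  exact pvMain argv.length argv le_rfl
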